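-- pv_equiv track=rewrite | github.com/miliar/Code_Jam_Webscraper | solutions_python/Problem_180/1190.py | solve
-- ===== SOURCE A (Python) =====
-- def solve(k, c):
--     if c == 1:
--         return [i for i in range(0, k)]
--     if k == 1:
--         return [0]
--     b = (k ** (c - 1))
--     assert (b == int(b))
--     b = int(b)
--     bstarts = [b * i for i in range(0, k)]
--     boffsets = solve(k, c - 1)
--     return [bstarts[i] + boffsets[i] for i in range(0, k)]
-- ===== SOURCE B (Python) =====
-- def solve(k, c):
--     if k == 1:
--         return [0]
--     r = (k ** c - 1) // (k - 1)
--     return [i * r for i in range(k)]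
-- ===== Notes on version B (the rewrite author's own statement) =====
-- stated objective: faster
-- what changed: replaces the depth-c recursion (which builds and index-combines two length-k lists per level) by the closed form result[i] = i*(k^c-1)/(k-1) computed once, with k==1 handled separately
-- outside the precondition, e.g. on solve(2, 0): A raises AssertionError, B returns [0, 0]
import Mathlib
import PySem

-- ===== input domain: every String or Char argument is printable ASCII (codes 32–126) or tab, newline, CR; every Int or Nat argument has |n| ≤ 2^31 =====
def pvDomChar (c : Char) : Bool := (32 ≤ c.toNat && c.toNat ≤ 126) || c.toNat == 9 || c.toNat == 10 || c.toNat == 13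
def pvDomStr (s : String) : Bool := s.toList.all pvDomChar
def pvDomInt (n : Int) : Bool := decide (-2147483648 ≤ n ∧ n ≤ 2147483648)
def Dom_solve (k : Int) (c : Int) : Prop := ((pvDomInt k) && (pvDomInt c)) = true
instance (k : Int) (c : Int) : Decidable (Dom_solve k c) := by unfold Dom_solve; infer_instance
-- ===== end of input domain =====

-- B computes each entry by the closed form result[i] = i*(k^c-1)/(k-1) instead of A's depth-c recursion (objective: faster).

-- ===== PORT A =====
-- A recurses with c decreasing by 1; the fuel counter is c.toNat, which equals the
-- recursion depth exactly on the inputs where Python returns (Pre_solve: 1 <= c or k = 1).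
def solveGo (k : Int) (c : Int) (fuel : Nat) : List Int :=
  if c = 1 then PySem.List.pyRange 0 k 1
  else if k = 1 then [0]
  else
    match fuel with
    | 0 => []   -- unreachable under Pre_solve (Python raises before reaching c <= 0)
    | n + 1 =>
      let b : Int := k ^ (c - 1).toNat          -- b = k ** (c - 1); the assert is a no-op on ints
      let bstarts := (PySem.List.pyRange 0 k 1).map (fun i => b * i)
      let boffsets := solveGo k (c - 1) n
      (PySem.List.pyRange 0 k 1).map
        (fun i => PySem.List.pyGetD bstarts i 0 + PySem.List.pyGetD boffsets i 0)
termination_by fuel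

def solve (k : Int) (c : Int) : List Int := solveGo k c c.toNat

-- ===== PORT B =====
def solve_alt (k : Int) (c : Int) : List Int :=
  if k = 1 then [0]
  else
    let r := PySem.Int.floordiv (k ^ c.toNat - 1) (k - 1)
    (PySem.List.pyRange 0 k 1).map (fun i => i * r)

-- ===== PRECONDITION & SPEC =====
-- Pre_ excludes c <= 0 with k /= 1, where Python A raises (AssertionError, or ZeroDivisionError for k = 0): k**(c-1) is a non-integral float there.
def Pre_solve (k : Int) (c : Int) : Prop := 1 ≤ c ∨ k = 1
instance (k : Int) (c : Int) : Decidable (Pre_solve k c) := by unfold Pre_solve; infer_instance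
def pvWitness_solve : Int × Int := (3, 2)
def Spec_solve (k : Int) (c : Int) (out : List Int) : Prop := out = solve_alt k c
instance (k : Int) (c : Int) (out : List Int) : Decidable (Spec_solve k c out) := by unfold Spec_solve; infer_instance

-- ===== CLAIM (what is proved, stated in full; the proofs are below) =====
def Claim_equal_solve : Prop := ∀ (k : Int) (c : Int), Dom_solve k c → Pre_solve k c → Spec_solve k c (solve k c)

-- ===== LEMMAS AND PROOFS =====

-- geometric sum 1 + k + ... + k^(n-1)
def geo (k : Int) (n : Nat) : Int := ∑ j ∈ Finset.range n, k ^ j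

theorem geo_one (k : Int) : geo k 1 = 1 := by simp [geo]

theorem geo_succ (k : Int) (n : Nat) : geo k (n + 1) = k ^ n + geo k n := by
  simp [geo, Finset.sum_range_succ]; ring

theorem geo_mul (k : Int) (n : Nat) : (k - 1) * geo k n = k ^ n - 1 := by
  rw [geo, mul_comm, geom_sum_mul]

theorem floordiv_geo (k : Int) (hk : k ≠ 1) (n : Nat) :
    PySem.Int.floordiv (k ^ n - 1) (k - 1) = geo k n := by
  have hne : k - 1 ≠ 0 := by omega
  have hd : (k - 1) ∣ (k ^ n - 1) := ⟨geo k n, (geo_mul k n).symm⟩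
  have hm : PySem.Int.mod (k ^ n - 1) (k - 1) = 0 :=
    (PySem.Int.mod_eq_zero_iff_dvd _ _).mpr hd
  have h := PySem.Int.floordiv_mul_add_mod (k ^ n - 1) (k - 1)
  rw [hm, add_zero] at h
  have h2 : PySem.Int.floordiv (k ^ n - 1) (k - 1) * (k - 1) = geo k n * (k - 1) := by
    rw [h, mul_comm, geo_mul]
  exact mul_right_cancel₀ hne h2

theorem solveGo_closed (k : Int) (hk : k ≠ 1) (c : Int) (n : Nat) (hc : 1 ≤ c)
    (hn : c.toNat ≤ n + 1) :
    solveGo k c n = (PySem.List.pyRange 0 k 1).map (fun i => i * geo k c.toNat) := by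
  induction n generalizing c with
  | zero =>
    have hc1 : c = 1 := by omega
    subst hc1
    unfold solveGo
    rw [if_pos rfl]
    simp [geo_one]
  | succ n ih =>
    by_cases hc1 : c = 1
    · subst hc1
      unfold solveGo
      rw [if_pos rfl]
      simp [geo_one]
    · have h2 : 2 ≤ c := by omega
      have hrec := ih (c - 1) (by omega) (by omega)
      unfold solveGo
      rw [if_neg hc1, if_neg hk]
      simp only [hrec]
      refine List.map_congr_left ?_
      intro i hi
      have hib : 0 ≤ i ∧ i < k := PySem.List.mem_pyRange_one.mp hi
      rw [PySem.List.pyGetD_map_pyRange_of_nonneg _ k i 0 hib.1 hib.2,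
          PySem.List.pyGetD_map_pyRange_of_nonneg _ k i 0 hib.1 hib.2]
      have hct : c.toNat = (c - 1).toNat + 1 := by omega
      rw [hct, geo_succ]
      ring

-- ===== VERDICT (by name: the statement is the Claim_ definition above) =====
theorem solve_spec : Claim_equal_solve := by
  intro k c _ hpre
  show solve k c = solve_alt k c
  by_cases hk : k = 1
  · subst hk
    have hr : PySem.List.pyRange 0 1 1 = [0] := by decide
    unfold solve solve_alt solveGo
    by_cases hc1 : c = 1
    · rw [if_pos hc1, if_pos rfl, hr]
    · rw [if_neg hc1, if_pos rfl, if_pos rfl]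
  · have hc : 1 ≤ c := hpre.resolve_right hk
    unfold solve solve_alt
    rw [solveGo_closed k hk c c.toNat hc (by omega)]
    simp [if_neg hk, floordiv_geo k hk]
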